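-- pv_equiv track=rewrite | github.com/kamilGie/WDI | Kolokwia/Kolokwium_2/2024_2A/Rozwiązania/main.py | luck17
-- ===== SOURCE A (Python) =====
-- def cyfry_piatkowe(x):
--     """Zwraca zbiór cyfr liczby x w systemie o podstawie 5."""
--     res = set()
--     while x > 0:
--         x, d = divmod(x, 5)
--         res.add(d)
--     return res
--
-- def sasiadujace_pola(i, j, n):
--     """generuje sąsiednie pola odległe o 1 lub 2 ruchy króla szachowego."""
--     for dx in range(-2, 3):  # Ruchy w zakresie -2, 2
--         for dy in range(-2, 3):
--             if dx == 0 and dy == 0:  # Pomijamy samo pole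
--                 continue
--             if 0 <= i + dx < n and 0 <= j + dy < n:  # czy pole jest w granicach
--                 yield (i + dx, j + dy)
--
-- def czy_szczesliwe(i, j, T):
--     liczba_pokrewnych = 0
--     cyfry_srodkowe = cyfry_piatkowe(T[i][j])
--
--     for x, y in sasiadujace_pola(i, j, len(T)):
--         if cyfry_piatkowe(T[x][y]) == cyfry_srodkowe:
--             liczba_pokrewnych += 1
--
--     return liczba_pokrewnych == 17
--
-- def luck17(T):
--     n = len(T)
--     szczesliwe_wiersze = [0] * n
--     szczesliwe_kolumny = [0] * n
--
--     # Sprawdzamy każde pole szachownicy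
--     for i in range(1, n - 1):  # bez granic bo one nie moga miec 17 sasiadow
--         for j in range(1, n - 1):
--             if czy_szczesliwe(i, j, T):
--                 szczesliwe_wiersze[i] += 1
--                 szczesliwe_kolumny[j] += 1
--
--                 # Jeśli już więcej niż jedno szczęśliwe pole w wierszu lub kolumnie
--                 if szczesliwe_wiersze[i] > 1 or szczesliwe_kolumny[j] > 1:
--                     return True
--     return False
-- ===== SOURCE B (Python) =====
-- def digits5(x):
--     """Set of base-5 digits of x (empty for x <= 0), by recursion."""
--     return set() if x <= 0 else {x % 5} | digits5(x // 5)
--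
-- def luck17(T):
--     n = len(T)
--     D = [[digits5(v) for v in row] for row in T]
--     lucky = [(i, j)
--              for i in range(1, n - 1)
--              for j in range(1, n - 1)
--              if sum(D[x][y] == D[i][j]
--                     for x in range(max(0, i - 2), min(n, i + 3))
--                     for y in range(max(0, j - 2), min(n, j + 3))) == 18]
--     rows = [i for i, _ in lucky]
--     cols = [j for _, j in lucky]
--     return len(set(rows)) < len(rows) or len(set(cols)) < len(cols)
-- ===== Notes on version B (the rewrite author's own statement) =====
-- stated objective: alternative
-- what changed: Replaces the interleaved per-row/per-column running counters with early return by a collect-then-analyze decomposition: precompute a grid of base-5 digit sets, collect all lucky interior coordinates (counting matches over the clipped 5x5 block including the center, threshold 18) in one pass, then detect a repeated row or column index by set-size comparison.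
import Mathlib
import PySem

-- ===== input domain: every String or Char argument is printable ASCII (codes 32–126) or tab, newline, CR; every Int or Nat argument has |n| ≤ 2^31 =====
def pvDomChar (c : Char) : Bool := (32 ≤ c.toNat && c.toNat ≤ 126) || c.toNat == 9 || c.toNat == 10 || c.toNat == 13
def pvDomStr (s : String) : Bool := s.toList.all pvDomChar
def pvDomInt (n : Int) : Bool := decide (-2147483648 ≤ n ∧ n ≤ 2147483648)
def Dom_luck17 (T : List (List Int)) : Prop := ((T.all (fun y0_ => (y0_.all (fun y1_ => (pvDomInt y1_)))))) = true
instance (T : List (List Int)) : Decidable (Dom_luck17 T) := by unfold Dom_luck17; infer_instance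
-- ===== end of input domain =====

-- B replaces A's interleaved running row/column counters (with early return) by a
-- collect-then-analyze decomposition: precompute the grid of base-5 digit sets, collect all
-- lucky coordinates in one pass (counting matches over the clipped 5x5 block INCLUDING the
-- center, threshold 18), then detect a repeated row/column index by set-size comparison.

-- ===== PORT A =====
-- res = set(); while x > 0: x, d = divmod(x, 5); res.add(d)
def cyfryLoop (x : Int) (res : PySem.Set Int) : PySem.Set Int :=
  if h : 0 < x then
    cyfryLoop (PySem.Int.floordiv x 5) (PySem.Set.add res (PySem.Int.mod x 5))
  else res
termination_by x.toNat
decreasing_by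
  rw [PySem.Int.floordiv_eq_ediv_of_pos (by norm_num : (0:Int) < 5)]
  omega

def cyfryPiatkowe (x : Int) : PySem.Set Int := cyfryLoop x PySem.Set.empty

-- the generator, materialised as the list of yielded pairs (same order)
def sasiadujacePola (i j n : Int) : List (Int × Int) :=
  (PySem.List.pyRange (-2) 3 1).foldl (fun acc dx =>
    (PySem.List.pyRange (-2) 3 1).foldl (fun acc2 dy =>
      if dx = 0 ∧ dy = 0 then acc2
      else if 0 ≤ i + dx ∧ i + dx < n ∧ 0 ≤ j + dy ∧ j + dy < n then acc2 ++ [(i + dx, j + dy)]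
      else acc2) acc) []

-- T[i][j] ported with pyGetD: exact for the in-bounds indices this code reaches under Pre_
def czySzczesliwe (i j : Int) (T : List (List Int)) : Bool :=
  let cyfrySrodkowe := cyfryPiatkowe (PySem.List.pyGetD (PySem.List.pyGetD T i []) j 0)
  ((sasiadujacePola i j (PySem.List.len T)).foldl (fun c p =>
      if PySem.Set.equal (cyfryPiatkowe (PySem.List.pyGetD (PySem.List.pyGetD T p.1 []) p.2 0)) cyfrySrodkowe
      then c + 1 else c) (0 : Int)) == 17

-- the inner 'for j' loop; none = the Python 'return True' fired
def luckInner (T : List (List Int)) (i : Int) (js : List Int) (w k : List Int) :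
    Option (List Int × List Int) :=
  match js with
  | [] => some (w, k)
  | j :: rest =>
    if czySzczesliwe i j T then
      let w' := w.set i.toNat (PySem.List.pyGetD w i 0 + 1)
      let k' := k.set j.toNat (PySem.List.pyGetD k j 0 + 1)
      if 1 < PySem.List.pyGetD w' i 0 ∨ 1 < PySem.List.pyGetD k' j 0 then none
      else luckInner T i rest w' k'
    else luckInner T i rest w k

-- the outer 'for i' loop
def luckOuter (T : List (List Int)) (is : List Int) (w k : List Int) :
    Option (List Int × List Int) :=
  match is with
  | [] => some (w, k)
  | i :: rest =>
    match luckInner T i (PySem.List.pyRange 1 (PySem.List.len T - 1) 1) w k with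
    | none => none
    | some (w', k') => luckOuter T rest w' k'

def luck17 (T : List (List Int)) : Bool :=
  let n := PySem.List.len T
  match luckOuter T (PySem.List.pyRange 1 (n - 1) 1)
      (List.replicate n.toNat 0) (List.replicate n.toNat 0) with
  | none => true
  | some _ => false

-- ===== PORT B =====
-- set() if x <= 0 else {x % 5} | digits5(x // 5)
def digits5 (x : Int) : PySem.Set Int :=
  if h : x ≤ 0 then PySem.Set.empty
  else PySem.Set.union (PySem.Set.ofList [PySem.Int.mod x 5]) (digits5 (PySem.Int.floordiv x 5))
termination_by x.toNat
decreasing_by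
  rw [PySem.Int.floordiv_eq_ediv_of_pos (by norm_num : (0:Int) < 5)]
  omega

-- sum(D[x][y] == D[i][j] for x in range(max(0,i-2),min(n,i+3)) for y in range(max(0,j-2),min(n,j+3)))
def blockCount (D : List (List (PySem.Set Int))) (n i j : Int) : Int :=
  let c := PySem.List.pyGetD (PySem.List.pyGetD D i []) j PySem.Set.empty
  ((PySem.List.pyRange (max 0 (i - 2)) (min n (i + 3)) 1).map (fun x =>
    ((PySem.List.pyRange (max 0 (j - 2)) (min n (j + 3)) 1).map (fun y =>
      if PySem.Set.equal (PySem.List.pyGetD (PySem.List.pyGetD D x []) y PySem.Set.empty) c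
      then (1 : Int) else 0)).sum)).sum

def luck17_alt (T : List (List Int)) : Bool :=
  let n := PySem.List.len T
  let D := T.map (fun row => row.map (fun v => digits5 v))
  let lucky := (PySem.List.pyRange 1 (n - 1) 1).flatMap (fun i =>
    ((PySem.List.pyRange 1 (n - 1) 1).filter (fun j => blockCount D n i j == 18)).map
      (fun j => (i, j)))
  let rows := lucky.map (fun p => p.1)
  let cols := lucky.map (fun p => p.2)
  decide ((PySem.Set.ofList rows).length < rows.length) ||
    decide ((PySem.Set.ofList cols).length < cols.length)

-- ===== PRECONDITION & SPEC =====
-- Pre_ excludes ragged grids with at least 3 rows (some row shorter than the number of rows):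
-- there A's neighbour lookups raise IndexError, except in rare cases where A early-returns True
-- before reaching a short row — and on those B's full collecting pass raises IndexError itself.
def Pre_luck17 (T : List (List Int)) : Prop :=
  3 ≤ T.length → ∀ row ∈ T, T.length ≤ row.length
instance (T : List (List Int)) : Decidable (Pre_luck17 T) := by unfold Pre_luck17; infer_instance

def pvWitness_luck17 : List (List Int) := [[0, 0, 0], [0, 1, 0], [0, 0, 0]]

def Spec_luck17 (T : List (List Int)) (out : Bool) : Prop := out = luck17_alt T
instance (T : List (List Int)) (out : Bool) : Decidable (Spec_luck17 T out) := by
  unfold Spec_luck17; infer_instance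

-- ===== CLAIM (what is proved, stated in full; the proofs are below) =====
def Claim_equal_luck17 : Prop :=
  ∀ (T : List (List Int)), Dom_luck17 T → Pre_luck17 T → Spec_luck17 T (luck17 T)

-- ===== LEMMAS AND PROOFS =====

-- digit sets: A's loop-with-accumulator and B's recursion have the same members
theorem mem_cyfryLoop (x : Int) (s : PySem.Set Int) (y : Int) :
    y ∈ cyfryLoop x s ↔ y ∈ s ∨ y ∈ digits5 x := by
  by_cases h : 0 < x
  · rw [cyfryLoop, digits5]
    simp only [h, dif_pos, dif_neg (by omega : ¬ x ≤ 0)]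
    rw [mem_cyfryLoop (PySem.Int.floordiv x 5) (PySem.Set.add s (PySem.Int.mod x 5)) y]
    rw [PySem.Set.mem_union, PySem.Set.mem_add]
    simp [PySem.Set.ofList]
    tauto
  · rw [cyfryLoop, digits5]
    simp only [dif_neg h, dif_pos (by omega : x ≤ 0)]
    simp [PySem.Set.empty]
termination_by x.toNat
decreasing_by
  rw [PySem.Int.floordiv_eq_ediv_of_pos (by norm_num : (0:Int) < 5)]
  omega

theorem equal_cyfry_digits (a b : Int) :
    PySem.Set.equal (cyfryPiatkowe a) (cyfryPiatkowe b) =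
      PySem.Set.equal (digits5 a) (digits5 b) := by
  rw [Bool.eq_iff_iff, PySem.Set.equal_iff, PySem.Set.equal_iff]
  constructor <;> intro h y <;> have := h y <;>
    simp only [cyfryPiatkowe, mem_cyfryLoop, PySem.Set.empty] at * <;> tauto

theorem equal_self {s : PySem.Set Int} : PySem.Set.equal s s = true := by
  rw [PySem.Set.equal_iff]; intro x; rfl

theorem digits5_zero : digits5 0 = PySem.Set.empty := by
  rw [digits5]; norm_num

-- the '==' comparison both programs make, written once
def matchB (T : List (List Int)) (i j x y : Int) : Bool :=
  PySem.Set.equal (digits5 (PySem.List.pyGetD (PySem.List.pyGetD T x []) y 0))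
    (digits5 (PySem.List.pyGetD (PySem.List.pyGetD T i []) j 0))

def ATerm (T : List (List Int)) (n i j dx dy : Int) : Int :=
  if (decide (¬(dx = 0 ∧ dy = 0)) &&
      decide (0 ≤ i + dx ∧ i + dx < n ∧ 0 ≤ j + dy ∧ j + dy < n)) &&
      matchB T i j (i + dx) (j + dy) then 1 else 0

theorem sasiad_eq (i j n : Int) :
    sasiadujacePola i j n =
      (PySem.List.pyRange (-2) 3 1).flatMap (fun dx =>
        ((PySem.List.pyRange (-2) 3 1).filter (fun dy =>
          decide (¬(dx = 0 ∧ dy = 0)) &&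
          decide (0 ≤ i + dx ∧ i + dx < n ∧ 0 ≤ j + dy ∧ j + dy < n))).map
          (fun dy => (i + dx, j + dy))) := by
  unfold sasiadujacePola
  have hin : ∀ (dx : Int) (acc : List (Int × Int)),
      (PySem.List.pyRange (-2) 3 1).foldl (fun acc2 dy =>
        if dx = 0 ∧ dy = 0 then acc2
        else if 0 ≤ i + dx ∧ i + dx < n ∧ 0 ≤ j + dy ∧ j + dy < n then acc2 ++ [(i + dx, j + dy)]
        else acc2) acc =
      acc ++ ((PySem.List.pyRange (-2) 3 1).filter (fun dy =>
          decide (¬(dx = 0 ∧ dy = 0)) &&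
          decide (0 ≤ i + dx ∧ i + dx < n ∧ 0 ≤ j + dy ∧ j + dy < n))).map
          (fun dy => (i + dx, j + dy)) := by
    intro dx acc
    rw [show (fun (acc2 : List (Int × Int)) (dy : Int) =>
        if dx = 0 ∧ dy = 0 then acc2
        else if 0 ≤ i + dx ∧ i + dx < n ∧ 0 ≤ j + dy ∧ j + dy < n then acc2 ++ [(i + dx, j + dy)]
        else acc2) =
      (fun (acc2 : List (Int × Int)) (dy : Int) =>
        if (decide (¬(dx = 0 ∧ dy = 0)) &&
            decide (0 ≤ i + dx ∧ i + dx < n ∧ 0 ≤ j + dy ∧ j + dy < n)) = true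
        then acc2 ++ [(i + dx, j + dy)] else acc2) from by
      funext acc2 dy
      by_cases h1 : dx = 0 ∧ dy = 0
      · simp [h1]
      · by_cases h2 : 0 ≤ i + dx ∧ i + dx < n ∧ 0 ≤ j + dy ∧ j + dy < n <;> simp [h1, h2]]
    exact PySem.List.foldl_append_if _ _ _ _
  rw [PySem.List.foldl_congr_mem _ _
    (fun acc dx =>
      acc ++ ((PySem.List.pyRange (-2) 3 1).filter (fun dy =>
          decide (¬(dx = 0 ∧ dy = 0)) &&
          decide (0 ≤ i + dx ∧ i + dx < n ∧ 0 ≤ j + dy ∧ j + dy < n))).map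
          (fun dy => (i + dx, j + dy))) _
    (fun acc dx _ => hin dx acc)]
  rw [PySem.List.foldl_append_eq_flatMap]
  simp

theorem countP_flatMap_int {A B : Type} (l : List A) (g : A -> List B) (P : B -> Bool) :
    ((List.countP P (l.flatMap g) : Nat) : Int) =
      (l.map (fun a => ((List.countP P (g a) : Nat) : Int))).sum := by
  induction l with
  | nil => simp
  | cons a rest ih => simp [List.countP_append, ih]

theorem countP_filter_to_sum {A : Type} (l : List A) (p q : A -> Bool) :
    ((List.countP q (l.filter p) : Nat) : Int) =
      (l.map (fun a => if p a && q a then (1 : Int) else 0)).sum := by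
  induction l with
  | nil => simp
  | cons a rest ih =>
    rw [List.filter_cons]
    by_cases h : p a
    · by_cases h2 : q a <;> simp [h, h2, ih] <;> omega
    · simp [h, ih]

theorem sum_filter_ite {A : Type} (l : List A) (p : A -> Bool) (F : A -> Int) :
    ((l.filter p).map F).sum = (l.map (fun a => if p a then F a else 0)).sum := by
  induction l with
  | nil => simp
  | cons a rest ih =>
    rw [List.filter_cons]
    by_cases h : p a <;> simp [h, ih]

theorem czy_count (T : List (List Int)) (i j : Int) :
    czySzczesliwe i j T =
      (((PySem.List.pyRange (-2) 3 1).map (fun dx =>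
        ((PySem.List.pyRange (-2) 3 1).map (fun dy =>
          ATerm T (PySem.List.len T) i j dx dy)).sum)).sum == 17) := by
  rw [czySzczesliwe]
  rw [sasiad_eq, PySem.List.foldl_count_if]
  rw [zero_add]
  have hsum :
      ((List.countP (fun p =>
          PySem.Set.equal
            (cyfryPiatkowe (PySem.List.pyGetD (PySem.List.pyGetD T p.1 []) p.2 0))
            (cyfryPiatkowe (PySem.List.pyGetD (PySem.List.pyGetD T i []) j 0)))
        ((PySem.List.pyRange (-2) 3 1).flatMap (fun dx =>
          ((PySem.List.pyRange (-2) 3 1).filter (fun dy =>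
            decide (¬(dx = 0 ∧ dy = 0)) &&
            decide (0 ≤ i + dx ∧ i + dx < PySem.List.len T ∧ 0 ≤ j + dy ∧
              j + dy < PySem.List.len T))).map (fun dy => (i + dx, j + dy)))) : Nat) : Int) =
      ((PySem.List.pyRange (-2) 3 1).map (fun dx =>
        ((PySem.List.pyRange (-2) 3 1).map (fun dy =>
          ATerm T (PySem.List.len T) i j dx dy)).sum)).sum := by
    rw [countP_flatMap_int]
    refine congrArg List.sum ?_
    apply List.map_congr_left
    intro dx _
    rw [List.countP_map, countP_filter_to_sum]
    refine congrArg List.sum ?_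
    apply List.map_congr_left
    intro dy _
    simp only [ATerm, matchB, Function.comp, equal_cyfry_digits]
    rfl
  rw [hsum]

theorem clip5 (c n : Int) :
    PySem.List.pyRange (max 0 (c - 2)) (min n (c + 3)) 1 =
      (PySem.List.pyRange (c - 2) (c + 3) 1).filter (fun x => decide (0 ≤ x ∧ x < n)) := by
  have h1 : (PySem.List.pyRange (max 0 (c - 2)) (min n (c + 3)) 1).Pairwise (· < ·) :=
    PySem.List.pairwise_lt_pyRange_one _ _
  have h2 : ((PySem.List.pyRange (c - 2) (c + 3) 1).filter
      (fun x => decide (0 ≤ x ∧ x < n))).Pairwise (· < ·) :=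
    List.Pairwise.filter _ (PySem.List.pairwise_lt_pyRange_one _ _)
  have hperm : (PySem.List.pyRange (max 0 (c - 2)) (min n (c + 3)) 1).Perm
      ((PySem.List.pyRange (c - 2) (c + 3) 1).filter (fun x => decide (0 ≤ x ∧ x < n))) := by
    rw [List.perm_ext_iff_of_nodup (h1.imp ne_of_lt) (h2.imp ne_of_lt)]
    intro a
    simp only [PySem.List.mem_pyRange_one, List.mem_filter, decide_eq_true_eq]
    omega
  exact List.Perm.eq_of_pairwise (fun a b _ _ hab hba => le_antisymm hab hba)
    (h1.imp le_of_lt) (h2.imp le_of_lt) hperm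

theorem shift5 (c : Int) :
    PySem.List.pyRange (c - 2) (c + 3) 1 =
      (PySem.List.pyRange (-2) 3 1).map (fun t => c + t) := by
  rw [PySem.List.pyRange_one, PySem.List.pyRange_one, List.map_map]
  have h1 : c + 3 - (c - 2) = 5 := by ring
  have h2 : (3 : Int) - (-2) = 5 := by norm_num
  rw [h1, h2]
  apply List.map_congr_left
  intro k _
  simp only [Function.comp_apply]
  ring

theorem lookup_digits (T : List (List Int)) (x y : Int) :
    PySem.List.pyGetD
        (PySem.List.pyGetD (T.map (fun row => row.map (fun v => digits5 v))) x []) y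
        PySem.Set.empty =
      digits5 (PySem.List.pyGetD (PySem.List.pyGetD T x []) y 0) := by
  have h1 : PySem.List.pyGetD (T.map (fun row => row.map (fun v => digits5 v))) x [] =
      (PySem.List.pyGetD T x []).map (fun v => digits5 v) := by
    have h := PySem.List.pyGetD_map (fun row => row.map (fun v => digits5 v)) T x []
    simpa using h
  rw [h1]
  have h2 := PySem.List.pyGetD_map (fun v => digits5 v) (PySem.List.pyGetD T x []) y 0
  rw [digits5_zero] at h2
  exact h2

theorem block_count (T : List (List Int)) (i j n : Int) (hn : n = PySem.List.len T) :
    blockCount (T.map (fun row => row.map (fun v => digits5 v))) n i j =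
      ((PySem.List.pyRange (-2) 3 1).map (fun dx =>
        if 0 ≤ i + dx ∧ i + dx < n then
          ((PySem.List.pyRange (-2) 3 1).map (fun dy =>
            if 0 ≤ j + dy ∧ j + dy < n then
              (if matchB T i j (i + dx) (j + dy) then (1 : Int) else 0)
            else 0)).sum
        else 0)).sum := by
  rw [blockCount]
  simp only [lookup_digits, clip5, shift5, List.filter_map, List.map_map]
  rw [sum_filter_ite]
  refine congrArg List.sum ?_
  apply List.map_congr_left
  intro dx _
  by_cases hbx : 0 ≤ i + dx ∧ i + dx < n
  · rw [if_pos, if_pos hbx]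
    swap
    · simp only [Function.comp_apply, decide_eq_true_eq]; exact hbx
    simp only [Function.comp_def]
    rw [sum_filter_ite]
    refine congrArg List.sum ?_
    apply List.map_congr_left
    intro dy _
    by_cases hby : 0 ≤ j + dy ∧ j + dy < n
    · rw [if_pos, if_pos hby]
      · simp [matchB]
      · simp only [Function.comp_apply, decide_eq_true_eq]; exact hby
    · rw [if_neg, if_neg hby]
      simp only [Function.comp_apply, decide_eq_true_eq]; exact hby
  · rw [if_neg, if_neg hbx]
    simp only [Function.comp_apply, decide_eq_true_eq]; exact hbx

theorem ATerm_eq_term (T : List (List Int)) (n i j dx dy : Int) (h : ¬(dx = 0 ∧ dy = 0)) :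
    ATerm T n i j dx dy =
      (if 0 ≤ i + dx ∧ i + dx < n then
        (if 0 ≤ j + dy ∧ j + dy < n then
          (if matchB T i j (i + dx) (j + dy) then (1 : Int) else 0) else 0) else 0) := by
  unfold ATerm
  by_cases h1 : 0 ≤ i + dx ∧ i + dx < n
  · by_cases h2 : 0 ≤ j + dy ∧ j + dy < n
    · have hc : 0 ≤ i + dx ∧ i + dx < n ∧ 0 ≤ j + dy ∧ j + dy < n :=
        ⟨h1.1, h1.2, h2.1, h2.2⟩
      simp [h, hc, h1, h2]
    · have hc : ¬(0 ≤ i + dx ∧ i + dx < n ∧ 0 ≤ j + dy ∧ j + dy < n) :=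
        fun hb => h2 ⟨hb.2.2.1, hb.2.2.2⟩
      simp [h, hc, h1, h2]
  · have hc : ¬(0 ≤ i + dx ∧ i + dx < n ∧ 0 ≤ j + dy ∧ j + dy < n) :=
      fun hb => h1 ⟨hb.1, hb.2.1⟩
    simp [h, hc, h1]

def SAx (T : List (List Int)) (n i j dx : Int) : Int :=
  ((PySem.List.pyRange (-2) 3 1).map (fun dy => ATerm T n i j dx dy)).sum

def SBx (T : List (List Int)) (n i j dx : Int) : Int :=
  if 0 ≤ i + dx ∧ i + dx < n then
    ((PySem.List.pyRange (-2) 3 1).map (fun dy =>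
      if 0 ≤ j + dy ∧ j + dy < n then
        (if matchB T i j (i + dx) (j + dy) then (1 : Int) else 0)
      else 0)).sum
  else 0

theorem ATerm_center (T : List (List Int)) (n i j : Int) : ATerm T n i j 0 0 = 0 := by
  unfold ATerm
  simp

theorem col_eq (T : List (List Int)) (n i j dx : Int) (hdx : dx ≠ 0) :
    SBx T n i j dx = SAx T n i j dx := by
  unfold SBx SAx
  by_cases hbx : 0 ≤ i + dx ∧ i + dx < n
  · rw [if_pos hbx]
    refine congrArg List.sum ?_
    apply List.map_congr_left
    intro dy _
    rw [ATerm_eq_term T n i j dx dy (fun hc => hdx hc.1), if_pos hbx]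
  · rw [if_neg hbx]
    have : ∀ dy ∈ PySem.List.pyRange (-2) 3 1, ATerm T n i j dx dy = 0 := by
      intro dy _
      rw [ATerm_eq_term T n i j dx dy (fun hc => hdx hc.1), if_neg hbx]
    rw [List.map_congr_left this]
    simp

theorem col_zero (T : List (List Int)) (n i j : Int)
    (hi1 : 1 ≤ i) (hi2 : i < n - 1) (hj1 : 1 ≤ j) (hj2 : j < n - 1) :
    SBx T n i j 0 = SAx T n i j 0 + 1 := by
  have hm : matchB T i j (i + 0) (j + 0) = true := by
    rw [add_zero, add_zero]
    unfold matchB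
    exact equal_self
  unfold SBx SAx
  rw [if_pos ⟨by omega, by omega⟩]
  have hR : PySem.List.pyRange (-2) 3 1 = [-2, -1, 0, 1, 2] := by decide
  rw [hR]
  simp only [List.map_cons, List.map_nil, List.sum_cons, List.sum_nil]
  rw [ATerm_eq_term T n i j 0 (-2) (by simp), ATerm_eq_term T n i j 0 (-1) (by simp),
    ATerm_eq_term T n i j 0 1 (by simp), ATerm_eq_term T n i j 0 2 (by simp), ATerm_center]
  rw [if_pos (⟨by omega, by omega⟩ : 0 ≤ i + 0 ∧ i + 0 < n),
    if_pos (⟨by omega, by omega⟩ : 0 ≤ i + 0 ∧ i + 0 < n),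
    if_pos (⟨by omega, by omega⟩ : 0 ≤ i + 0 ∧ i + 0 < n),
    if_pos (⟨by omega, by omega⟩ : 0 ≤ i + 0 ∧ i + 0 < n)]
  rw [show (if 0 ≤ j + 0 ∧ j + 0 < n then
      (if matchB T i j (i + 0) (j + 0) then (1 : Int) else 0) else 0) = 1 from by
    rw [if_pos ⟨by omega, by omega⟩, hm]; rfl]
  omega

theorem czy_eq_block (T : List (List Int)) (i j n : Int) (hn : n = PySem.List.len T)
    (hi1 : 1 ≤ i) (hi2 : i < n - 1) (hj1 : 1 ≤ j) (hj2 : j < n - 1) :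
    czySzczesliwe i j T =
      (blockCount (T.map (fun row => row.map (fun v => digits5 v))) n i j == 18) := by
  rw [czy_count T i j, block_count T i j n hn, ← hn]
  show ((((PySem.List.pyRange (-2) 3 1).map (fun dx => SAx T n i j dx)).sum) == 17) =
    ((((PySem.List.pyRange (-2) 3 1).map (fun dx => SBx T n i j dx)).sum) == 18)
  have hR : PySem.List.pyRange (-2) 3 1 = [-2, -1, 0, 1, 2] := by decide
  have key : ((PySem.List.pyRange (-2) 3 1).map (fun dx => SBx T n i j dx)).sum =
      ((PySem.List.pyRange (-2) 3 1).map (fun dx => SAx T n i j dx)).sum + 1 := by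
    rw [hR]
    simp only [List.map_cons, List.map_nil, List.sum_cons, List.sum_nil]
    rw [col_eq T n i j (-2) (by norm_num), col_eq T n i j (-1) (by norm_num),
      col_eq T n i j 1 (by norm_num), col_eq T n i j 2 (by norm_num),
      col_zero T n i j hi1 hi2 hj1 hj2]
    omega
  rw [key]
  rw [Bool.eq_iff_iff]
  simp only [beq_iff_eq]
  omega

-- ===== the loop =====
def cntList (N : Nat) (R : List Int) : List Int :=
  (List.range N).map (fun (t : Nat) => (R.count (t : Int) : Int))

def specGo (p : Int → Int → Bool) (cs : List (Int × Int)) (R C : List Int) :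
    Option (List Int × List Int) :=
  match cs with
  | [] => some (R, C)
  | (i, j) :: rest =>
    if p i j then
      if i ∈ R ∨ j ∈ C then none else specGo p rest (R ++ [i]) (C ++ [j])
    else specGo p rest R C

theorem specGo_append (p : Int → Int → Bool) (a b : List (Int × Int)) (R C : List Int) :
    specGo p (a ++ b) R C =
      match specGo p a R C with
      | none => none
      | some rc => specGo p b rc.1 rc.2 := by
  induction a generalizing R C with
  | nil => simp [specGo]
  | cons c rest ih =>
    obtain ⟨i, j⟩ := c
    simp only [List.cons_append, specGo]
    split_ifs <;> simp [ih]

theorem cnt_getD (N : Nat) (R : List Int) (i : Int) (h0 : 0 ≤ i) (h1 : i < (N : Int)) :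
    PySem.List.pyGetD (cntList N R) i 0 = (R.count i : Int) := by
  rw [PySem.List.pyGetD_eq_getElem _ _ h0 (by simp [cntList]; omega)]
  simp only [cntList]
  rw [List.getElem_map, List.getElem_range]
  congr 2
  omega

theorem cnt_set (N : Nat) (R : List Int) (i : Int) (h0 : 0 ≤ i) (h1 : i < (N : Int)) :
    (cntList N R).set i.toNat (PySem.List.pyGetD (cntList N R) i 0 + 1) =
      cntList N (R ++ [i]) := by
  rw [cnt_getD N R i h0 h1]
  apply List.ext_getElem
  · simp [cntList]
  · intro t ht1 ht2
    simp only [cntList] at ht2 ⊢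
    rw [List.getElem_set, List.getElem_map, List.getElem_range,
      List.getElem_map, List.getElem_range, List.count_append, List.count_singleton]
    by_cases h : i.toNat = t
    · subst h
      have hc : ((i.toNat : Int)) = i := by omega
      rw [if_pos rfl, hc]
      simp
    · have hne : ¬ ((i : Int) == (t : Int)) = true := by simp; omega
      rw [if_neg h]
      simp [hne]

theorem luckInner_spec (T : List (List Int)) (N : Nat) (hN : N = T.length) (i : Int)
    (h0 : 0 ≤ i) (h1 : i < (N : Int)) :
    ∀ (js : List Int) (R C : List Int), (∀ j ∈ js, 0 ≤ j ∧ j < (N : Int)) →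
    luckInner T i js (cntList N R) (cntList N C) =
      (specGo (fun a b => czySzczesliwe a b T) (js.map (fun j => (i, j))) R C).map
        (fun rc => (cntList N rc.1, cntList N rc.2)) := by
  intro js
  induction js with
  | nil => intro R C _; simp [luckInner, specGo]
  | cons j rest ih =>
    intro R C hb
    obtain ⟨hj0, hj1⟩ := hb j (by simp)
    simp only [luckInner, List.map_cons, specGo]
    by_cases hl : czySzczesliwe i j T
    · simp only [hl, if_pos]
      rw [cnt_set N R i h0 h1, cnt_set N C j hj0 hj1]
      rw [cnt_getD N (R ++ [i]) i h0 h1, cnt_getD N (C ++ [j]) j hj0 hj1]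
      have hg : (1 < ((R ++ [i]).count i : Int) ∨ 1 < ((C ++ [j]).count j : Int)) ↔
          (i ∈ R ∨ j ∈ C) := by
        rw [List.count_append, List.count_append, List.count_singleton_self,
          List.count_singleton_self]
        have e1 : i ∈ R ↔ 0 < R.count i := List.count_pos_iff.symm
        have e2 : j ∈ C ↔ 0 < C.count j := List.count_pos_iff.symm
        rw [e1, e2]
        omega
      by_cases hm : i ∈ R ∨ j ∈ C
      · rw [if_pos (hg.mpr hm), if_pos hm]; rfl
      · rw [if_neg (fun hcon => hm (hg.mp hcon)), if_neg hm]
        exact ih (R ++ [i]) (C ++ [j]) (fun j' hj' => hb j' (by simp [hj']))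
    · simp only [hl, if_neg, Bool.false_eq_true]
      exact ih R C (fun j' hj' => hb j' (by simp [hj']))

theorem luckOuter_spec (T : List (List Int)) (N : Nat) (hN : N = T.length) :
    ∀ (is : List Int) (R C : List Int), (∀ i ∈ is, 0 ≤ i ∧ i < (N : Int)) →
    luckOuter T is (cntList N R) (cntList N C) =
      (specGo (fun a b => czySzczesliwe a b T)
        (is.flatMap (fun i =>
          (PySem.List.pyRange 1 (PySem.List.len T - 1) 1).map (fun j => (i, j)))) R C).map
        (fun rc => (cntList N rc.1, cntList N rc.2)) := by
  intro is
  induction is with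
  | nil => intro R C _; simp [luckOuter, specGo]
  | cons i rest ih =>
    intro R C hb
    obtain ⟨hi0, hi1⟩ := hb i (by simp)
    have hjs : ∀ j ∈ PySem.List.pyRange 1 (PySem.List.len T - 1) 1,
        0 ≤ j ∧ j < (N : Int) := by
      intro j hj
      rw [PySem.List.mem_pyRange_one] at hj
      simp only [PySem.List.len] at hj
      omega
    simp only [luckOuter, List.flatMap_cons, specGo_append]
    rw [luckInner_spec T N hN i hi0 hi1 _ R C hjs]
    cases hs : specGo (fun a b => czySzczesliwe a b T)
        ((PySem.List.pyRange 1 (PySem.List.len T - 1) 1).map (fun j => (i, j))) R C with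
    | none => simp
    | some rc =>
      simp only [Option.map_some]
      exact ih rc.1 rc.2 (fun i' hi' => hb i' (by simp [hi']))

theorem specGo_none (p : Int → Int → Bool) (cs : List (Int × Int)) :
    ∀ (R C : List Int), R.Nodup → C.Nodup →
    ((specGo p cs R C).isNone = true ↔
      (¬ (R ++ (cs.filter (fun c => p c.1 c.2)).map Prod.fst).Nodup ∨
       ¬ (C ++ (cs.filter (fun c => p c.1 c.2)).map Prod.snd).Nodup)) := by
  induction cs with
  | nil => intro R C hR hC; simp [specGo, hR, hC]
  | cons c rest ih =>
    intro R C hR hC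
    obtain ⟨i, j⟩ := c
    simp only [specGo, List.filter_cons]
    by_cases hp : p i j
    · simp only [hp, if_pos]
      by_cases hm : i ∈ R ∨ j ∈ C
      · rw [if_pos hm]
        simp only [Option.isNone_none, true_iff]
        rcases hm with hm | hm
        · left; intro hcon
          rw [List.nodup_append] at hcon
          exact hcon.2.2 i hm (i, j).1 (by simp [hp]) rfl
        · right; intro hcon
          rw [List.nodup_append] at hcon
          exact hcon.2.2 j hm (i, j).2 (by simp [hp]) rfl
      · rw [if_neg hm]
        push_neg at hm
        have := ih (R ++ [i]) (C ++ [j])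
          (by simp [List.nodup_append, hR]; exact fun a ha he => hm.1 (he ▸ ha))
          (by simp [List.nodup_append, hC]; exact fun a ha he => hm.2 (he ▸ ha))
        rw [this]
        simp only [List.map_cons, ← List.append_cons]
    · simp only [hp, Bool.false_eq_true, if_neg, if_false]
      exact ih R C hR hC

-- set-size duplicate test
theorem ofList_sublist (xs : List Int) : (PySem.Set.ofList xs).Sublist xs := by
  induction xs with
  | nil => simp [PySem.Set.ofList]
  | cons x rest ih =>
    rw [PySem.Set.ofList_cons]
    refine List.Sublist.cons₂ x (List.Sublist.trans ?_ ih)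
    simp only [PySem.Set.discard]
    exact List.filter_sublist

theorem setlen_lt (xs : List Int) :
    ((PySem.Set.ofList xs).length < xs.length) ↔ ¬ xs.Nodup := by
  constructor
  · intro h hn
    rw [PySem.Set.ofList_eq_self_of_nodup xs hn] at h
    omega
  · intro hn
    have hle := List.Sublist.length_le (ofList_sublist xs)
    rcases lt_or_eq_of_le hle with h | h
    · exact h
    · exfalso
      exact hn ((List.Sublist.eq_of_length (ofList_sublist xs) h) ▸ PySem.Set.nodup_ofList xs)

theorem cnt_nil (N : Nat) : cntList N [] = List.replicate N 0 := by
  simp [cntList, List.map_const']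

theorem flatMap_filter_comm (D : List (List (PySem.Set Int))) (n : Int) (l1 l2 : List Int) :
    l1.flatMap (fun i =>
        (l2.filter (fun j => blockCount D n i j == 18)).map (fun j => (i, j))) =
      (l1.flatMap (fun i => l2.map (fun j => (i, j)))).filter
        (fun c => blockCount D n c.1 c.2 == 18) := by
  induction l1 with
  | nil => simp
  | cons a rest ih =>
    simp only [List.flatMap_cons, List.filter_append, ih, List.filter_map]
    rfl

-- ===== VERDICT (by name: the statement is the Claim_ definition above) =====
theorem luck17_spec : Claim_equal_luck17 := by
  unfold Claim_equal_luck17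
  intro T _hd _hp
  unfold Spec_luck17
  have hlen : PySem.List.len T = (T.length : Int) := by simp [PySem.List.len]
  have hbnd : ∀ i ∈ PySem.List.pyRange 1 (PySem.List.len T - 1) 1,
      0 ≤ i ∧ i < (T.length : Int) := by
    intro i hi
    rw [PySem.List.mem_pyRange_one] at hi
    rw [hlen] at hi
    omega
  have hrep : List.replicate (PySem.List.len T).toNat (0 : Int) = cntList T.length [] := by
    rw [cnt_nil, hlen]
    simp
  have hcong : ∀ c ∈ (PySem.List.pyRange 1 (PySem.List.len T - 1) 1).flatMap (fun i =>
      (PySem.List.pyRange 1 (PySem.List.len T - 1) 1).map (fun j => (i, j))),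
      (blockCount (T.map (fun row => row.map (fun v => digits5 v)))
        (PySem.List.len T) c.1 c.2 == 18) = czySzczesliwe c.1 c.2 T := by
    intro c hc
    simp only [List.mem_flatMap, List.mem_map] at hc
    obtain ⟨i, hi, j, hj, rfl⟩ := hc
    rw [PySem.List.mem_pyRange_one] at hi hj
    exact (czy_eq_block T i j (PySem.List.len T) rfl hi.1 hi.2 hj.1 hj.2).symm
  simp only [luck17, luck17_alt]
  rw [hrep, luckOuter_spec T T.length rfl _ [] [] hbnd]
  rw [flatMap_filter_comm]
  rw [List.filter_congr hcong]
  simp only [show (fun p : Int × Int => p.1) = Prod.fst from rfl,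
    show (fun p : Int × Int => p.2) = Prod.snd from rfl]
  have hiff := specGo_none (fun a b => czySzczesliwe a b T)
    ((PySem.List.pyRange 1 (PySem.List.len T - 1) 1).flatMap (fun i =>
      (PySem.List.pyRange 1 (PySem.List.len T - 1) 1).map (fun j => (i, j)))) [] []
    List.nodup_nil List.nodup_nil
  simp only [List.nil_append] at hiff
  cases hsg : specGo (fun a b => czySzczesliwe a b T)
      ((PySem.List.pyRange 1 (PySem.List.len T - 1) 1).flatMap (fun i =>
        (PySem.List.pyRange 1 (PySem.List.len T - 1) 1).map (fun j => (i, j)))) [] [] with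
  | none =>
    rw [hsg] at hiff
    have hd := hiff.mp rfl
    simp only [Option.map_none]
    show true = _
    symm
    rw [Bool.or_eq_true, decide_eq_true_eq, decide_eq_true_eq]
    rcases hd with h | h
    · left
      exact (setlen_lt _).mpr h
    · right
      exact (setlen_lt _).mpr h
  | some rc =>
    rw [hsg] at hiff
    have hd := mt hiff.mpr (by simp)
    rw [not_or, not_not, not_not] at hd
    have h1 := fun hlt => (setlen_lt _).mp hlt hd.1
    have h2 := fun hlt => (setlen_lt _).mp hlt hd.2
    simp only [Option.map_some]
    show false = _
    rw [decide_eq_false h1, decide_eq_false h2]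
    rfl
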